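-- pv_equiv track=rewrite | github.com/andriimazur93/Python | topic7_strings.py | isReverse
-- ===== SOURCE A (Python) =====
-- def isReverse(word1, word2):
--     i = 0
--     j = len(word2)
--     flag = False
--     if(len(word1)!=len(word2)):
--         return False
--     while(j>=0 and i<= len(word1)-1):
--         if(word1[i] != word2[j-1]):
--             return False
--         i+=1
--         j-=1
--     return True
-- ===== SOURCE B (Python) =====
-- def isReverse(word1, word2):
--     return word1 == word2[::-1]
-- ===== Notes on version B (the rewrite author's own statement) =====
-- stated objective: simpler
-- what changed: Replaces the manual two-index while loop with state variables by a single slice-reverse of word2 and one sequence equality comparison.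
import Mathlib
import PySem

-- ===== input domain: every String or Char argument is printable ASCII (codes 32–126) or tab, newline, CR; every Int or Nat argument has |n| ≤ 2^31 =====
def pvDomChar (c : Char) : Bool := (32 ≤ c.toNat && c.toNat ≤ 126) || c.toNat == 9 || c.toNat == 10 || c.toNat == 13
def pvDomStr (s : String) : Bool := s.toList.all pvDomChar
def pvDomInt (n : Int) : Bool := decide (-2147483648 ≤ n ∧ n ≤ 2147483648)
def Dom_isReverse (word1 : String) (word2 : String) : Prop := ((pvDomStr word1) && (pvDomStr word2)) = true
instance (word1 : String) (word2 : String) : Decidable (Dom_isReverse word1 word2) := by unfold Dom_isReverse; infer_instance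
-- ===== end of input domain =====

-- B replaces A's two-index while loop by a slice-reverse and one equality comparison (simpler, same cost).

-- ===== PORT A =====
-- the while loop of A, with fuel (the loop runs at most len(word1) iterations; fuel len+1 is never exhausted)
def isRevLoop (w1 w2 : List Char) : Nat → Int → Int → Bool
  | 0, _, _ => true
  | f + 1, i, j =>
    if j ≥ 0 ∧ i ≤ (w1.length : Int) - 1 then
      match PySem.List.pyGet? w1 i, PySem.List.pyGet? w2 (j - 1) with
      | some a, some b => if a ≠ b then false else isRevLoop w1 w2 f (i + 1) (j - 1)
      | _, _ => false   -- IndexError; unreachable since lengths are equal when the loop runs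
    else true

def isReverse (word1 : String) (word2 : String) : Bool :=
  let w1 := word1.toList
  let w2 := word2.toList
  if w1.length ≠ w2.length then false
  else isRevLoop w1 w2 (w1.length + 1) 0 (w2.length : Int)

-- ===== PORT B =====
def isReverse_alt (word1 : String) (word2 : String) : Bool :=
  word1.toList == word2.toList.reverse

-- ===== PRECONDITION & SPEC =====
def Spec_isReverse (word1 : String) (word2 : String) (out : Bool) : Prop := out = isReverse_alt word1 word2
instance (word1 : String) (word2 : String) (out : Bool) : Decidable (Spec_isReverse word1 word2 out) := by unfold Spec_isReverse; infer_instance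

-- ===== CLAIM (what is proved, stated in full; the proofs are below) =====
def Claim_equal_isReverse : Prop := ∀ (word1 : String) (word2 : String), Dom_isReverse word1 word2 → Spec_isReverse word1 word2 (isReverse word1 word2)

-- ===== LEMMAS AND PROOFS =====

-- loop invariant: starting at position i (with j = n - i), the loop decides
-- "the tail of w1 from i equals the reverse of the first n-i characters of w2"
lemma isRevLoop_eq (l1 l2 : List Char) (h : l1.length = l2.length) :
    ∀ (f i : Nat), i ≤ l1.length → l1.length - i ≤ f →
      isRevLoop l1 l2 f (i : Int) ((l1.length : Int) - (i : Int)) =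
        (l1.drop i == (l2.take (l1.length - i)).reverse) := by
  intro f
  induction f with
  | zero =>
    intro i hi hf
    have : i = l1.length := by omega
    subst this
    simp [isRevLoop]
  | succ f ih =>
    intro i hi hf
    by_cases hlt : i < l1.length
    · have hi2 : i < l2.length := by omega
      have hk : l1.length - i - 1 < l2.length := by omega
      rw [isRevLoop]
      have hget1 : PySem.List.pyGet? l1 (i : Int) = some l1[i] := by
        rw [PySem.List.pyGet?_natCast]; simp [hlt]
      have hj : ((l1.length : Int) - (i : Int)) - 1 = ((l1.length - i - 1 : Nat) : Int) := by omega
      have hget2 : PySem.List.pyGet? l2 (((l1.length : Int) - (i : Int)) - 1)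
          = some l2[l1.length - i - 1] := by
        rw [hj, PySem.List.pyGet?_natCast]; simp [hk]
      rw [if_pos ⟨by omega, by omega⟩, hget1, hget2]
      change (if l1[i] ≠ l2[l1.length - i - 1] then false
              else isRevLoop l1 l2 f ((i : Int) + 1) ((l1.length : Int) - (i : Int) - 1)) = _
      have hdrop : l1.drop i = l1[i] :: l1.drop (i + 1) := List.drop_eq_getElem_cons hlt
      have htake : (l2.take (l1.length - i)).reverse
          = l2[l1.length - i - 1]'hk :: (l2.take (l1.length - i - 1)).reverse := by
        conv_lhs => rw [show l1.length - i = (l1.length - i - 1) + 1 from by omega]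
        rw [List.take_add_one]
        simp [List.getElem?_eq_getElem hk]
      rw [hdrop, htake]
      by_cases heq : l1[i] = l2[l1.length - i - 1]
      · rw [if_neg (by simp [heq])]
        rw [show (l1.length : Int) - (i : Int) - 1 = (l1.length : Int) - ((i + 1 : Nat) : Int) from by push_cast; omega,
            show ((i : Int) + 1) = ((i + 1 : Nat) : Int) from by push_cast; omega]
        rw [ih (i + 1) (by omega) (by omega)]
        rw [show l1.length - (i + 1) = l1.length - i - 1 from by omega]
        simp [List.cons_beq_cons, heq]
      · rw [if_pos (by simp [heq])]
        symm
        rw [beq_eq_false_iff_ne]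
        intro hc
        injection hc with h1 _
        exact heq h1
    · have : i = l1.length := by omega
      subst this
      rw [isRevLoop]
      rw [if_neg (by omega)]
      simp

-- ===== VERDICT (by name: the statement is the Claim_ definition above) =====
theorem isReverse_spec : Claim_equal_isReverse := by
  intro word1 word2 _
  unfold Spec_isReverse isReverse isReverse_alt
  set l1 := word1.toList
  set l2 := word2.toList
  by_cases h : l1.length = l2.length
  · rw [if_neg (by omega)]
    have key := isRevLoop_eq l1 l2 h (l1.length + 1) 0 (by omega) (by omega)
    simp only [Nat.cast_zero, Int.sub_zero, Nat.sub_zero] at key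
    rw [← h, key]
    simp [List.take_of_length_le (by omega : l2.length ≤ l1.length)]
  · rw [if_pos (by omega)]
    have hne : l1 ≠ l2.reverse := by
      intro he
      apply h
      rw [he, List.length_reverse]
    simp [hne]
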